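-- pv_equiv track=rewrite | github.com/gitmengzh/leetcode | competition/competition_263_03.py | aaa
-- ===== SOURCE A (Python) =====
-- from collections import Counter
-- from itertools import combinations
--
-- def aaa(nums):
--     temp = []
--     for i in range(1, len(nums)+1):         # 生成所有的子集
--         for j in combinations(nums, i):         # itertools.combinations(iterable, r) 从可迭代对象iterable中选取r个单位进行组合，并返回一个生成元组(tuple)的迭代器
--             temp.append(j)
--
--     for s in range(len(temp)):       # 遍历所有子集，或运算生成结果并保存在原数组中
--         k0 = 0
--         for k in temp[s]:
--             k0 |= k
--         temp[s] = k0
--     ans = Counter(temp)             # 通过collections.Counter（）方法统计结果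
--     res = 0
--     for r in ans.keys():
--         if ans[r] > res:
--             res = ans[r]
--     return res
-- ===== SOURCE B (Python) =====
-- from collections import Counter
--
-- def aaa(nums):
--     # Incremental subset-OR construction: each loop step doubles the multiset
--     # of subset-OR values instead of re-enumerating combinations by size.
--     ors = []
--     for x in nums:
--         ors = ors + [o | x for o in ors] + [x]
--     c = Counter(ors)
--     return max(c.values(), default=0)
-- ===== Notes on version B (the rewrite author's own statement) =====
-- stated objective: alternative
-- what changed: B builds the multiset of subset-OR values incrementally (each element doubles the list, reusing previously computed ORs) instead of enumerating all combinations of every size and re-folding each tuple, then takes max of Counter values directly.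
import Mathlib
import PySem

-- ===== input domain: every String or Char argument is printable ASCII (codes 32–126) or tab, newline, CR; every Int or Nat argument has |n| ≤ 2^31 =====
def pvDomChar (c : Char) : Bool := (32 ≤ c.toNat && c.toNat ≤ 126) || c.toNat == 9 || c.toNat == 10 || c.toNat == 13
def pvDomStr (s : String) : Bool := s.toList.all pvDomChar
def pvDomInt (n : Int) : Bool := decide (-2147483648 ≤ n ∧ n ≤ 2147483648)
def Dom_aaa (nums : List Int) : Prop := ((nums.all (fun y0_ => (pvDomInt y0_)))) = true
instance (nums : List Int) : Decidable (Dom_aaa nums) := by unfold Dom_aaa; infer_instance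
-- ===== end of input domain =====

-- B builds the multiset of subset-OR values incrementally (doubling, reusing previous ORs)
-- instead of enumerating combinations of every size and OR-folding each tuple from scratch.


-- ===== PORT A =====
def aaa (nums : List Int) : Int :=
  -- temp: all combinations of size i for i in range(1, len(nums)+1), appended in order
  let temp : List (List Int) :=
    (PySem.List.pyRange 1 ((nums.length : Int) + 1) 1).foldl
      (fun t i => t ++ PySem.List.combinations nums i.toNat) []
  -- second loop: temp[s] := OR-fold of the tuple temp[s] (ported as a map over temp)
  let temp2 : List Int := temp.map (fun j => j.foldl (fun k0 k => PySem.Int.bor k0 k) 0)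
  let ans : PySem.Dict Int Int := PySem.Dict.counter temp2
  (ans.keys).foldl (fun res r => if ans.getD r 0 > res then ans.getD r 0 else res) 0

-- ===== PORT B =====
def aaa_alt (nums : List Int) : Int :=
  let ors : List Int :=
    nums.foldl (fun ors x => ors ++ ors.map (fun o => PySem.Int.bor o x) ++ [x]) []
  let c : PySem.Dict Int Int := PySem.Dict.counter ors
  match PySem.List.max? c.values (fun v => v) with
  | some m => m
  | none => 0

-- ===== PRECONDITION & SPEC =====
def Spec_aaa (nums : List Int) (out : Int) : Prop := out = aaa_alt nums
instance (nums : List Int) (out : Int) : Decidable (Spec_aaa nums out) := by unfold Spec_aaa; infer_instance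

-- ===== CLAIM (what is proved, stated in full; the proofs are below) =====
def Claim_equal_aaa : Prop := ∀ (nums : List Int), Dom_aaa nums → Spec_aaa nums (aaa nums)

-- ===== LEMMAS AND PROOFS =====

-- OR of a subset, as both programs fold it (starting from 0)
def pvOR (l : List Int) : Int := l.foldl (fun a b => PySem.Int.bor a b) 0

-- all subsets (as sublists) of l, head-recursively
def pvSubs : List Int → List (List Int)
  | [] => [[]]
  | x :: xs => pvSubs xs ++ (pvSubs xs).map (x :: ·)

-- all combinations of every size 0..|l|
def pvAllc (l : List Int) : List (List Int) :=
  (List.range (l.length + 1)).flatMap (fun k => PySem.List.combinations l k)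

-- B's incrementally built list of subset-OR values
def pvOrs (l : List Int) : List Int :=
  l.foldl (fun ors x => ors ++ ors.map (fun o => PySem.Int.bor o x) ++ [x]) []

-- max multiplicity in a list, via its counter
def pvMaxCount (X : List Int) : Int :=
  ((PySem.Set.ofList X).map (fun k => (X.count k : Int))).foldl max 0

lemma pv_flatMap_add {α β : Type} (l : List α) (f g : α → List β) :
    (↑(l.flatMap (fun k => f k ++ g k)) : Multiset β) = ↑(l.flatMap f) + ↑(l.flatMap g) := by
  induction l with
  | nil => simp
  | cons a t ih =>
    simp only [List.flatMap_cons, ← Multiset.coe_add, ih]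
    abel

-- pvAllc with its leading empty combination split off
lemma pv_allc_cons_empty (l : List Int) :
    pvAllc l = [[]] ++ (List.range l.length).flatMap
      (fun k => PySem.List.combinations l (k + 1)) := by
  unfold pvAllc
  rw [List.range_succ_eq_map]
  simp [PySem.List.combinations_zero, List.flatMap_map]

lemma pv_allc_perm_subs (l : List Int) :
    (↑(pvAllc l) : Multiset (List Int)) = ↑(pvSubs l) := by
  induction l with
  | nil => simp [pvAllc, pvSubs, PySem.List.combinations_zero]
  | cons x xs ih =>
    have h1 : pvAllc (x :: xs) = [[]] ++ (List.range (xs.length + 1)).flatMap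
        (fun k => (PySem.List.combinations xs k).map (x :: ·) ++
                  PySem.List.combinations xs (k + 1)) := by
      rw [pv_allc_cons_empty]
      simp [PySem.List.combinations_cons_succ]
    have h2 : (List.range (xs.length + 1)).flatMap
        (fun k => (PySem.List.combinations xs k).map (x :: ·)) =
        (pvAllc xs).map (x :: ·) := by
      unfold pvAllc
      rw [List.map_flatMap]
    have h3 : (List.range (xs.length + 1)).flatMap
        (fun k => PySem.List.combinations xs (k + 1)) =
        (List.range xs.length).flatMap (fun k => PySem.List.combinations xs (k + 1)) := by
      rw [List.range_succ, List.flatMap_append]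
      simp [PySem.List.combinations_eq_nil_of_length_lt]
    have h4 : (↑(([([] : List Int)]) ++ (List.range xs.length).flatMap
        (fun k => PySem.List.combinations xs (k + 1))) : Multiset (List Int)) =
        ↑(pvSubs xs) := by
      rw [← pv_allc_cons_empty]; exact ih
    calc (↑(pvAllc (x :: xs)) : Multiset (List Int))
        = (↑([([] : List Int)]) : Multiset (List Int)) + (↑((pvAllc xs).map (x :: ·)) : Multiset (List Int)) +
          ↑((List.range xs.length).flatMap (fun k => PySem.List.combinations xs (k + 1))) := by
          rw [h1]
          simp only [← Multiset.coe_add]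
          rw [pv_flatMap_add, h2, h3]
          abel
      _ = ↑((pvAllc xs).map (x :: ·)) + ↑(pvSubs xs) := by
          rw [← h4]
          simp only [← Multiset.coe_add]
          abel
      _ = ↑(pvSubs (x :: xs)) := by
          have : (↑((pvAllc xs).map (x :: ·)) : Multiset (List Int)) =
              ↑((pvSubs xs).map (x :: ·)) := by
            simp only [← Multiset.map_coe, ih]
          rw [this]
          show _ = (↑(pvSubs xs ++ (pvSubs xs).map (x :: ·)) : Multiset (List Int))
          simp only [← Multiset.coe_add]
          abel

lemma pv_subs_snoc (l : List Int) (x : Int) :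
    (↑(pvSubs (l ++ [x])) : Multiset (List Int)) =
      ↑(pvSubs l) + ↑((pvSubs l).map (· ++ [x])) := by
  induction l with
  | nil =>
    simp only [pvSubs, List.nil_append, List.map_cons, List.map_nil]
    rfl
  | cons a t ih =>
    show (↑(pvSubs (t ++ [x]) ++ (pvSubs (t ++ [x])).map (a :: ·)) : Multiset (List Int)) = _
    simp only [← Multiset.coe_add, ← Multiset.map_coe, ih]
    show _ = (↑(pvSubs t ++ (pvSubs t).map (a :: ·)) : Multiset (List Int)) +
      Multiset.map (· ++ [x]) ↑(pvSubs t ++ (pvSubs t).map (a :: ·))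
    simp only [← Multiset.coe_add, ← Multiset.map_coe, Multiset.map_add, Multiset.map_map]
    have : ((· ++ [x]) ∘ (a :: ·) : List Int → List Int) = (a :: ·) ∘ (· ++ [x]) := by
      funext s; rfl
    rw [this]
    abel

lemma pv_or_snoc (s : List Int) (x : Int) :
    pvOR (s ++ [x]) = PySem.Int.bor (pvOR s) x := by
  simp [pvOR, List.foldl_append]

lemma pv_ors_perm (l : List Int) :
    (↑(0 :: pvOrs l) : Multiset Int) = Multiset.map pvOR ↑(pvSubs l) := by
  induction l using List.reverseRecOn with
  | nil => simp [pvOrs, pvSubs, pvOR]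
  | append_singleton t x ih =>
    have hstep : pvOrs (t ++ [x]) =
        pvOrs t ++ (pvOrs t).map (fun o => PySem.Int.bor o x) ++ [x] := by
      simp [pvOrs, List.foldl_append]
    have hx : PySem.Int.bor 0 x = x := by simp [pysem]
    calc (↑(0 :: pvOrs (t ++ [x])) : Multiset Int)
        = ↑(0 :: pvOrs t) + Multiset.map (fun o => PySem.Int.bor o x) ↑(0 :: pvOrs t) := by
          rw [hstep]
          have hR : Multiset.map (fun o => PySem.Int.bor o x) (↑(0 :: pvOrs t) : Multiset Int) =
              ↑(x :: (pvOrs t).map (fun o => PySem.Int.bor o x)) := by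
            rw [← Multiset.cons_coe, Multiset.map_cons, hx, Multiset.map_coe, Multiset.cons_coe]
          rw [hR, Multiset.coe_add]
          rw [Multiset.coe_eq_coe]
          refine List.Perm.cons 0 ?_
          rw [List.append_assoc]
          exact List.Perm.append_left _ (List.perm_append_singleton x _)
      _ = Multiset.map pvOR ↑(pvSubs t) +
          Multiset.map (fun o => PySem.Int.bor o x) (Multiset.map pvOR ↑(pvSubs t)) := by
          rw [ih]
      _ = Multiset.map pvOR ↑(pvSubs (t ++ [x])) := by
          rw [pv_subs_snoc]
          simp only [Multiset.map_add, Multiset.map_map, ← Multiset.map_coe]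
          congr 1
          · congr 1
            funext s
            simp [pv_or_snoc]

-- A's temp list equals the flatMap over sizes 1..n
lemma pv_tempA_eq (nums : List Int) :
    (PySem.List.pyRange 1 ((nums.length : Int) + 1) 1).foldl
        (fun t i => t ++ PySem.List.combinations nums i.toNat) [] =
      (List.range nums.length).flatMap (fun k => PySem.List.combinations nums (k + 1)) := by
  rw [PySem.List.foldl_append_eq_flatMap, List.nil_append, PySem.List.pyRange_one]
  have hn : ((nums.length : Int) + 1 - 1).toNat = nums.length := by omega
  rw [hn, List.flatMap_map]
  congr 1
  funext k
  have : ((1 : Int) + (k : Int)).toNat = k + 1 := by omega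
  simp [this]

-- the running-max-of-counts loop is pvMaxCount
lemma pv_max_loop (ks : List Int) (cnt : Int → Int) (init : Int) :
    ks.foldl (fun res r => if cnt r > res then cnt r else res) init =
      (ks.map cnt).foldl max init := by
  rw [List.foldl_map]
  apply PySem.List.foldl_congr_mem
  intro acc r _
  by_cases h : cnt r > acc
  · simp only [if_pos h]
    exact (max_eq_right h.le).symm
  · simp only [if_neg h]
    exact (max_eq_left (not_lt.mp h)).symm

lemma pv_maxCount_perm (X Y : List Int) (h : X.Perm Y) : pvMaxCount X = pvMaxCount Y := by
  unfold pvMaxCount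
  have hc : (fun k => ((X.count k : Nat) : Int)) = fun k => ((Y.count k : Nat) : Int) := by
    funext k; rw [h.count_eq]
  have hs : (PySem.Set.ofList X).Perm (PySem.Set.ofList Y) := by
    rw [List.perm_ext_iff_of_nodup (PySem.Set.nodup_ofList X) (PySem.Set.nodup_ofList Y)]
    intro v
    rw [PySem.Set.mem_ofList, PySem.Set.mem_ofList]
    exact h.mem_iff
  rw [hc]
  exact List.Perm.foldl_op_eq (hs.map _)

lemma pv_A_maxCount (nums : List Int) :
    aaa nums = pvMaxCount (((List.range nums.length).flatMap
      (fun k => PySem.List.combinations nums (k + 1))).map pvOR) := by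
  unfold aaa
  rw [pv_tempA_eq]
  simp only [PySem.Dict.getD_counter, PySem.Dict.keys_counter]
  rw [pv_max_loop]
  rfl

lemma pv_B_maxCount (nums : List Int) : aaa_alt nums = pvMaxCount (pvOrs nums) := by
  unfold aaa_alt
  have hv : (PySem.Dict.counter (pvOrs nums)).values =
      (PySem.Set.ofList (pvOrs nums)).map (fun k => (((pvOrs nums).count k : Nat) : Int)) := by
    simp [PySem.Dict.values, PySem.Dict.items_counter]
  show (match PySem.List.max? (PySem.Dict.counter (pvOrs nums)).values (fun v => v) with
        | some m => m | none => 0) = _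
  rw [hv]
  unfold pvMaxCount
  cases hm : (PySem.Set.ofList (pvOrs nums)).map (fun k => (((pvOrs nums).count k : Nat) : Int)) with
  | nil =>
    have hnone : PySem.List.max? ([] : List Int) (fun v : Int => v) = none := by
      rw [PySem.List.max?_eq_none_iff]
    rw [hnone]
    rfl
  | cons v t =>
    rw [PySem.List.max?_id_cons]
    have hv0 : (0 : Int) ≤ v := by
      have : v ∈ (PySem.Set.ofList (pvOrs nums)).map
          (fun k => (((pvOrs nums).count k : Nat) : Int)) := by
        rw [hm]; exact List.mem_cons_self
      obtain ⟨k, _, hk⟩ := List.mem_map.mp this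
      rw [← hk]; exact Int.natCast_nonneg _
    simp [max_eq_right hv0]

lemma pv_perm_main (nums : List Int) :
    (((List.range nums.length).flatMap
      (fun k => PySem.List.combinations nums (k + 1))).map pvOR).Perm (pvOrs nums) := by
  apply List.Perm.cons_inv (a := 0)
  rw [← Multiset.coe_eq_coe]
  have h0 : (0 : Int) :: ((List.range nums.length).flatMap
      (fun k => PySem.List.combinations nums (k + 1))).map pvOR = (pvAllc nums).map pvOR := by
    rw [pv_allc_cons_empty]
    simp [pvOR]
  rw [h0, pv_ors_perm]
  simp only [← Multiset.map_coe, pv_allc_perm_subs]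

-- ===== VERDICT (by name: the statement is the Claim_ definition above) =====
theorem aaa_spec : Claim_equal_aaa := by
  intro nums _
  show aaa nums = aaa_alt nums
  rw [pv_A_maxCount, pv_B_maxCount]
  exact pv_maxCount_perm _ _ (pv_perm_main nums)
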